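-- pv_equiv track=rewrite | github.com/adrianogil/UnitySemanticDiff | src/parser_utils.py | is_escaped_string_element
-- ===== SOURCE A (Python) =====
-- def is_escaped_string_element(line, j):
--   if line[j] != '\'' and line[j] != '\"':
--     return False
--   if j == 0:
--       return False
--   escaped_string = False
--   j = j - 1
--   while j >= 0 and line[j] == '\\':
--       escaped_string = not escaped_string
--       j = j - 1
--   return escaped_string
-- ===== SOURCE B (Python) =====
-- def is_escaped_string_element(line, j):
--     quote = line[j] in ("'", '"')
--     escaped = False
--     for ch in line[:max(j, 0)]:
--         escaped = not escaped if ch == '\\' else False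
--     return quote and escaped
-- ===== Notes on version B (the rewrite author's own statement) =====
-- stated objective: alternative
-- what changed: Replaces A's backward toggling while-loop over the trailing backslash run (with its j==0 special case) by a forward lexer-style scan of the whole prefix line[:j] that keeps an escaped-state accumulator which flips on backslash and resets to False on any other character.
import Mathlib
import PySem

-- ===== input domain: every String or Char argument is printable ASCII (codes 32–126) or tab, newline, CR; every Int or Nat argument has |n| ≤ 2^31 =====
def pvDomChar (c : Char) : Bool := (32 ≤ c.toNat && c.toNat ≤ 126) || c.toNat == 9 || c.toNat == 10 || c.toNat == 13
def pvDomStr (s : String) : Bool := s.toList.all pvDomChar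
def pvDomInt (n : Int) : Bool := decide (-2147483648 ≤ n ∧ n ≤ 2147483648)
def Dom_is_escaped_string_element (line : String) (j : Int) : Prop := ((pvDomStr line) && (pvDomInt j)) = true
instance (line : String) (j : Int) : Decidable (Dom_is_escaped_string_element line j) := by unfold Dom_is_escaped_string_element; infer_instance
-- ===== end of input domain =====

-- B replaces A's backward toggling while-loop over the trailing backslash run by a forward
-- lexer-style scan of line[:j] with an escaped-state accumulator (objective: alternative).

-- ===== PORT A =====
-- while j >= 0 and line[j] == '\\': escaped_string = not escaped_string; j = j - 1
def escLoopA (cs : List Char) (j : Int) (esc : Bool) : Bool :=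
  if h : 0 ≤ j ∧ PySem.List.pyGet? cs j = some '\\' then
    escLoopA cs (j - 1) (!esc)
  else esc
termination_by (j + 1).toNat
decreasing_by omega

def is_escaped_string_element (line : String) (j : Int) : Bool :=
  match PySem.Str.pyGet? line j with
  | none => false  -- IndexError: excluded by Pre_
  | some c =>
    if c ≠ '\'' ∧ c ≠ '"' then false
    else if j = 0 then false
    else escLoopA line.toList (j - 1) false

-- ===== PORT B =====
def is_escaped_string_element_alt (line : String) (j : Int) : Bool :=
  match PySem.Str.pyGet? line j with
  | none => false  -- IndexError: excluded by Pre_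
  | some c =>
    let quote := c == '\'' || c == '"'
    -- for ch in line[:max(j,0)]: escaped = not escaped if ch == '\\' else False
    let escaped := (PySem.List.slice line.toList none (some (max j 0))).foldl
      (fun e ch => if ch == '\\' then !e else false) false
    quote && escaped

-- ===== PRECONDITION & SPEC =====
-- Pre_ excludes exactly the out-of-range indices, on which Python A raises IndexError.
def Pre_is_escaped_string_element (line : String) (j : Int) : Prop :=
  PySem.Raise.InRange line.toList.length j
instance (line : String) (j : Int) : Decidable (Pre_is_escaped_string_element line j) := by
  unfold Pre_is_escaped_string_element; infer_instance

def pvWitness_is_escaped_string_element : String × Int := ("a\\'", 2)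

def Spec_is_escaped_string_element (line : String) (j : Int) (out : Bool) : Prop := out = is_escaped_string_element_alt line j
instance (line : String) (j : Int) (out : Bool) : Decidable (Spec_is_escaped_string_element line j out) := by unfold Spec_is_escaped_string_element; infer_instance

-- ===== CLAIM (what is proved, stated in full; the proofs are below) =====
def Claim_equal_is_escaped_string_element : Prop := ∀ (line : String) (j : Int), Dom_is_escaped_string_element line j → Pre_is_escaped_string_element line j → Spec_is_escaped_string_element line j (is_escaped_string_element line j)

-- ===== LEMMAS AND PROOFS =====

-- A's loop from index n-1 toggles once per trailing backslash of (cs.take n).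
theorem escLoopA_parity (cs : List Char) (n : Nat) (hn : n ≤ cs.length) (esc : Bool) :
    escLoopA cs ((n : Int) - 1) esc
      = (esc ^^ decide ((((cs.take n).reverse.takeWhile (fun c => c == '\\')).length) % 2 = 1)) := by
  induction n generalizing esc with
  | zero =>
    rw [escLoopA]
    simp
  | succ n ih =>
    have hlt : n < cs.length := by omega
    have hget : PySem.List.pyGet? cs ((n : Int)) = some cs[n] := by
      simp [hlt]
    have htake : (cs.take (n + 1)).reverse = cs[n] :: (cs.take n).reverse := by
      rw [List.take_add_one]
      simp [hlt]
    rw [escLoopA]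
    by_cases hb : cs[n] = '\\'
    · have hc : (0 : Int) ≤ (n : Int) + 1 - 1 ∧
          PySem.List.pyGet? cs ((n : Int) + 1 - 1) = some '\\' := by
        refine ⟨by omega, ?_⟩
        rw [show ((n : Int) + 1 - 1) = (n : Int) by ring, hget, hb]
      rw [dif_pos (by push_cast; exact_mod_cast hc)]
      have : ((n : Int) + 1 - 1 - 1) = (n : Int) - 1 := by ring
      push_cast
      rw [this, ih (by omega)]
      rw [htake]
      simp [List.takeWhile, hb, Nat.add_mod]
      rcases esc <;> rcases hpar : decide (((cs.take n).reverse.takeWhile (fun c => c == '\\')).length % 2 = 1) <;>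
        simp_all
    · rw [dif_neg]
      · rw [htake]
        simp [hb]
      · push_cast
        intro h
        rcases h with ⟨_, h2⟩
        rw [show (n : Int) + 1 - 1 = (n : Int) by ring, hget] at h2
        exact hb (by simpa using h2)

-- B's forward accumulator over a prefix computes the parity of that prefix's trailing backslash run.
theorem foldl_esc_parity (p : List Char) :
    p.foldl (fun e ch => if ch == '\\' then !e else false) false
      = decide ((p.reverse.takeWhile (fun c => c == '\\')).length % 2 = 1) := by
  induction p using List.reverseRecOn with
  | nil => simp
  | append_singleton q a ih =>
    rw [List.foldl_append, ih]
    by_cases hb : a = '\\'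
    · simp only [hb, List.foldl_cons, List.foldl_nil, List.reverse_append, List.reverse_singleton,
        List.singleton_append, List.takeWhile]
      simp [Nat.add_mod]
      rcases hpar : decide (((q.reverse.takeWhile (fun c => c == '\\')).length) % 2 = 1) <;> simp_all
    · simp [hb]

-- ===== VERDICT (by name: the statement is the Claim_ definition above) =====
theorem is_escaped_string_element_spec : Claim_equal_is_escaped_string_element := by
  intro line j _ hpre
  unfold Spec_is_escaped_string_element
  unfold is_escaped_string_element is_escaped_string_element_alt
  cases hget : PySem.Str.pyGet? line j with
  | none => rfl
  | some c =>
    dsimp only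
    by_cases hq : c ≠ '\'' ∧ c ≠ '"'
    · rw [if_pos hq]
      have : (c == '\'' || c == '"') = false := by
        simp [hq.1, hq.2]
      simp [this]
    · rw [if_neg hq]
      have hquote : (c == '\'' || c == '"') = true := by
        rcases not_and_or.mp hq with h | h <;> simp [not_not.mp h]
      rw [hquote, Bool.true_and]
      by_cases hj0 : j ≤ 0
      · have hmax : max j 0 = 0 := by omega
        rw [hmax]
        have hslice : PySem.List.slice line.toList none (some (0 : Int)) = line.toList.take (0 : Int).toNat :=
          PySem.List.slice_to line.toList (by omega)
        simp only [hslice]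
        by_cases hj : j = 0
        · rw [if_pos hj]; simp
        · rw [if_neg hj]
          rw [escLoopA, dif_neg (by intro h; omega)]
          simp
      · rw [if_neg (by omega : ¬ j = 0)]
        have hmax : max j 0 = j := by omega
        have hjlen : j ≤ (line.toList.length : Int) := by
          unfold Pre_is_escaped_string_element at hpre
          simp only [PySem.Raise.InRange] at hpre
          omega
        have hslice : PySem.List.slice line.toList none (some j) = line.toList.take j.toNat :=
          PySem.List.slice_to line.toList (by omega)
        rw [hmax, hslice, foldl_esc_parity]
        have := escLoopA_parity line.toList j.toNat (by omega) false
        rw [show ((j.toNat : Int) - 1) = j - 1 by omega] at this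
        rw [this]
        simp
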